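-- pv_equiv track=rewrite | github.com/Erichy-dev/BeesFarm | Class1.py | is_in_excluded_spawn_area
-- ===== SOURCE A (Python) =====
-- def is_in_excluded_spawn_area(x, y):
--     excluded_areas = [
--         (range(1, 4), range(7, 10)),
--         (range(4, 7), range(10, 14)),
--         (range(7, 10), range(7, 10)),
--         (range(4, 7), range(4, 7)),
--         (range(4, 7), range(7, 10)),  # flower zone
--     ]
--     return any(x in xr and y in yr for xr, yr in excluded_areas)
-- ===== SOURCE B (Python) =====
-- def is_in_excluded_spawn_area(x, y):
--     # Closed-form union of the five rectangles: the horizontal band y in 7..9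
--     # spans x in 1..9 (areas 1, 3 and the flower zone), and the vertical strip
--     # x in 4..6 spans y in 4..13 (areas 2, 4 and the flower zone).
--     return (7 <= y <= 9 and 1 <= x <= 9) or (4 <= x <= 6 and 4 <= y <= 13)
-- ===== Notes on version B (the rewrite author's own statement) =====
-- stated objective: simpler
-- what changed: The loop over five (range,range) areas with range-membership tests is replaced by a loop-free closed-form pair of inequality conjunctions describing the union (a horizontal band y in 7..9 with x in 1..9, plus a vertical strip x in 4..6 with y in 4..13).
import Mathlib
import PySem

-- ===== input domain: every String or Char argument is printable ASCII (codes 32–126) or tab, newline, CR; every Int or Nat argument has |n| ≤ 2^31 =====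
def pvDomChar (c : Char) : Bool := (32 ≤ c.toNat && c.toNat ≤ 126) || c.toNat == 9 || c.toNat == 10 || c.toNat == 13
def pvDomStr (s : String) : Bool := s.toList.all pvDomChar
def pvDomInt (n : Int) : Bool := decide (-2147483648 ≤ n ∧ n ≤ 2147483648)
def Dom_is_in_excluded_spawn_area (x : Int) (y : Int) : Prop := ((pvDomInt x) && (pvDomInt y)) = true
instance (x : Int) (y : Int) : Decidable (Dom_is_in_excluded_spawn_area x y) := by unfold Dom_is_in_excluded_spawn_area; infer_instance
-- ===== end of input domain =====

-- B replaces A's loop over five (range,range) areas by a loop-free closed-form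
-- inequality condition describing the same union of rectangles (objective: simpler).

-- ===== PORT A =====
def is_in_excluded_spawn_area (x : Int) (y : Int) : Bool :=
  let excluded_areas : List (List Int × List Int) :=
    [ (PySem.List.pyRange 1 4 1, PySem.List.pyRange 7 10 1),
      (PySem.List.pyRange 4 7 1, PySem.List.pyRange 10 14 1),
      (PySem.List.pyRange 7 10 1, PySem.List.pyRange 7 10 1),
      (PySem.List.pyRange 4 7 1, PySem.List.pyRange 4 7 1),
      (PySem.List.pyRange 4 7 1, PySem.List.pyRange 7 10 1) ]
  excluded_areas.any (fun p => p.1.contains x && p.2.contains y)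

-- ===== PORT B =====
def is_in_excluded_spawn_area_alt (x : Int) (y : Int) : Bool :=
  ((7 ≤ y && y ≤ 9) && (1 ≤ x && x ≤ 9)) || ((4 ≤ x && x ≤ 6) && (4 ≤ y && y ≤ 13))

-- ===== PRECONDITION & SPEC =====
def Spec_is_in_excluded_spawn_area (x : Int) (y : Int) (out : Bool) : Prop := out = is_in_excluded_spawn_area_alt x y
instance (x : Int) (y : Int) (out : Bool) : Decidable (Spec_is_in_excluded_spawn_area x y out) := by unfold Spec_is_in_excluded_spawn_area; infer_instance

-- ===== CLAIM (what is proved, stated in full; the proofs are below) =====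
def Claim_equal_is_in_excluded_spawn_area : Prop := ∀ (x : Int) (y : Int), Dom_is_in_excluded_spawn_area x y → Spec_is_in_excluded_spawn_area x y (is_in_excluded_spawn_area x y)

-- ===== LEMMAS AND PROOFS =====

-- ===== VERDICT (by name: the statement is the Claim_ definition above) =====
theorem is_in_excluded_spawn_area_spec : Claim_equal_is_in_excluded_spawn_area := by
  intro x y _
  show is_in_excluded_spawn_area x y = is_in_excluded_spawn_area_alt x y
  rw [Bool.eq_iff_iff]
  unfold is_in_excluded_spawn_area is_in_excluded_spawn_area_alt
  simp only [List.any_eq_true, List.mem_cons, List.not_mem_nil, or_false, Bool.and_eq_true,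
    Bool.or_eq_true, List.contains_iff_mem, decide_eq_true_eq]
  constructor
  · rintro ⟨p, hp, hx, hy⟩
    rcases hp with rfl|rfl|rfl|rfl|rfl <;>
      rw [PySem.List.mem_pyRange_one] at hx hy <;> omega
  · intro h
    by_cases h1 : 7 ≤ y ∧ y ≤ 9
    · by_cases h2 : 1 ≤ x ∧ x ≤ 3
      · exact ⟨(PySem.List.pyRange 1 4 1, PySem.List.pyRange 7 10 1), Or.inl rfl, PySem.List.mem_pyRange_one.mpr (by omega),
          PySem.List.mem_pyRange_one.mpr (by omega)⟩
      · by_cases h3 : 7 ≤ x ∧ x ≤ 9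
        · exact ⟨(PySem.List.pyRange 7 10 1, PySem.List.pyRange 7 10 1), Or.inr (Or.inr (Or.inl rfl)), PySem.List.mem_pyRange_one.mpr (by omega),
            PySem.List.mem_pyRange_one.mpr (by omega)⟩
        · exact ⟨(PySem.List.pyRange 4 7 1, PySem.List.pyRange 7 10 1), Or.inr (Or.inr (Or.inr (Or.inr rfl))),
            PySem.List.mem_pyRange_one.mpr (by omega), PySem.List.mem_pyRange_one.mpr (by omega)⟩
    · by_cases h4 : 10 ≤ y
      · exact ⟨(PySem.List.pyRange 4 7 1, PySem.List.pyRange 10 14 1), Or.inr (Or.inl rfl), PySem.List.mem_pyRange_one.mpr (by omega),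
          PySem.List.mem_pyRange_one.mpr (by omega)⟩
      · exact ⟨(PySem.List.pyRange 4 7 1, PySem.List.pyRange 4 7 1), Or.inr (Or.inr (Or.inr (Or.inl rfl))),
          PySem.List.mem_pyRange_one.mpr (by omega), PySem.List.mem_pyRange_one.mpr (by omega)⟩
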